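-- pv_equiv track=rewrite | github.com/hampegayatri/Leetcode | 2147-number-of-ways-to-divide-a-long-corridor/2147-number-of-ways-to-divide-a-long-corridor.py | numberOfWays
-- ===== SOURCE A (Python) =====
-- def numberOfWays(C):
--     places = [i for i, x in enumerate(C) if C[i] == "S"]
--     m = len(places)
--     if m % 2 == 1 or m < 2: return 0
--
--     ans = 1
--     for i in range(m//2 - 1):
--         ans = (ans * (places[2*i+2] - places[2*i+1])) % (10**9 + 7)
--     return ans
-- ===== SOURCE B (Python) =====
-- def numberOfWays(C):
--     MOD = 10**9 + 7
--     seats = 0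
--     between = 0
--     ways = 1
--     for c in C:
--         if c == "S":
--             seats += 1
--             if seats % 2 == 1 and seats >= 3:
--                 ways = ways * (between + 1) % MOD
--             between = 0
--         elif seats and seats % 2 == 0:
--             between += 1
--     if seats % 2 == 1 or seats < 2:
--         return 0
--     return ways
-- ===== Notes on version B (the rewrite author's own statement) =====
-- stated objective: alternative
-- what changed: Instead of materialising the list of all seat indices and re-scanning it in index pairs places[2i+2]-places[2i+1], B makes a single pass over the string with a seat-parity counter and a counter of non-seat characters seen since the last seat of a completed pair, multiplying the answer by that count plus one each time an odd-numbered seat (the 3rd, 5th, ...) is reached; O(1) extra space instead of an O(n) index list.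
import Mathlib
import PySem

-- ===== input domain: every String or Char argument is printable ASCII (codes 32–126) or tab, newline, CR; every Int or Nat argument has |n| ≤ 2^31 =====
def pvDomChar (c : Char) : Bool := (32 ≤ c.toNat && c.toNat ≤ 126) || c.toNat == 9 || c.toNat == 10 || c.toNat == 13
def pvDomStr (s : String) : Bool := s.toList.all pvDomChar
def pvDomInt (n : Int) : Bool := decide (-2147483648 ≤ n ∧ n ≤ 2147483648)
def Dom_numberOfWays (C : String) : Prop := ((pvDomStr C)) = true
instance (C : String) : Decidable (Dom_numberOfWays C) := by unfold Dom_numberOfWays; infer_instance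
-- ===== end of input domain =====

-- B replaces A's seat-index list and paired re-scan of it by a single pass over the string keeping seat-parity and gap counters (alternative decomposition, O(1) extra space).

-- ===== PORT A =====
-- places = [i for i, x in enumerate(C) if C[i] == "S"]  (C[i] via pyGetD: the index i comes from enumerate, so it is always in range and Python never raises)
def numberOfWays (C : String) : Int :=
  let places : List Int :=
    ((PySem.List.enumerate C.toList 0).filter
      (fun p => PySem.List.pyGetD C.toList p.1 ' ' == 'S')).map (·.1)
  let m : Int := (places.length : Int)
  if PySem.Int.mod m 2 = 1 ∨ m < 2 then 0
  else
    (PySem.List.pyRange 0 (PySem.Int.floordiv m 2 - 1) 1).foldl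
      (fun ans i =>
        PySem.Int.mod
          (ans * (PySem.List.pyGetD places (2*i+2) 0 - PySem.List.pyGetD places (2*i+1) 0))
          (10^9 + 7)) 1

-- ===== PORT B =====
-- the body of Source B's `for c in C` loop, on the state (seats, between, ways)
def pvScanStep (st : Int × Int × Int) (c : Char) : Int × Int × Int :=
  if c = 'S' then
    let seats := st.1 + 1
    let ways :=
      if PySem.Int.mod seats 2 = 1 ∧ seats ≥ 3 then
        PySem.Int.mod (st.2.2 * (st.2.1 + 1)) (10^9 + 7)
      else st.2.2
    (seats, 0, ways)
  else if st.1 ≠ 0 ∧ PySem.Int.mod st.1 2 = 0 then (st.1, st.2.1 + 1, st.2.2)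
  else st

def numberOfWays_alt (C : String) : Int :=
  let st := C.toList.foldl pvScanStep (0, 0, 1)
  if PySem.Int.mod st.1 2 = 1 ∨ st.1 < 2 then 0 else st.2.2

-- ===== PRECONDITION & SPEC =====
def Spec_numberOfWays (C : String) (out : Int) : Prop := out = numberOfWays_alt C
instance (C : String) (out : Int) : Decidable (Spec_numberOfWays C out) := by unfold Spec_numberOfWays; infer_instance

-- ===== CLAIM (what is proved, stated in full; the proofs are below) =====
def Claim_equal_numberOfWays : Prop := ∀ (C : String), Dom_numberOfWays C → Spec_numberOfWays C (numberOfWays C)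

-- ===== LEMMAS AND PROOFS =====

-- indices of 'S' in l, starting at offset s (proof-side characterisation of A's `places`)
def pvPlaces : Int → List Char → List Int
  | _, [] => []
  | s, c :: r => if c = 'S' then s :: pvPlaces (s+1) r else pvPlaces (s+1) r

-- differences of consecutive disjoint pairs: [a,b,c,d,…] ↦ [b-a, d-c, …]
def pvPairDiffs : List Int → List Int
  | a :: b :: r => (b - a) :: pvPairDiffs r
  | _ => []

-- the gaps B's scan multiplies, as a state machine: E = even positive seat count (b = current `between`), O = odd seat count
mutual
def pvGapsE : List Char → Int → List Int
  | [], _ => []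
  | c :: r, b => if c = 'S' then (b + 1) :: pvGapsO r else pvGapsE r (b + 1)
def pvGapsO : List Char → List Int
  | [] => []
  | c :: r => if c = 'S' then pvGapsE r 0 else pvGapsO r
end

-- start state: no seat seen yet
def pvGaps0 : List Char → List Int
  | [] => []
  | c :: r => if c = 'S' then pvGapsO r else pvGaps0 r

def pvStep (a g : Int) : Int := PySem.Int.mod (a * g) (10^9 + 7)

def pvCnt : List Char → Int
  | [] => 0
  | c :: r => (if c = 'S' then 1 else 0) + pvCnt r

theorem pv_mod_two (a : Int) : PySem.Int.mod a 2 = a % 2 :=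
  PySem.Int.mod_eq_emod_of_pos (by norm_num)

theorem pv_filter_pred (l : List Char) :
    (PySem.List.enumerate l 0).filter (fun p => PySem.List.pyGetD l p.1 ' ' == 'S')
      = (PySem.List.enumerate l 0).filter (fun p => p.2 == 'S') := by
  apply List.filter_congr
  intro p hp
  rw [PySem.List.mem_enumerate_iff] at hp
  obtain ⟨k, hk, rfl⟩ := hp
  simp [PySem.List.pyGetD_natCast, List.getD_eq_getElem?_getD, List.getElem?_eq_getElem hk]

theorem pv_places_enum (l : List Char) : ∀ s : Int,
    ((PySem.List.enumerate l s).filter (fun p => p.2 == 'S')).map (·.1) = pvPlaces s l := by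
  induction l with
  | nil => intro s; simp [pvPlaces]
  | cons c r ih =>
    intro s
    by_cases hc : c = 'S' <;>
      simp [PySem.List.enumerate_cons, pvPlaces, hc, ih]

theorem pv_cnt_places (l : List Char) : ∀ s : Int, ((pvPlaces s l).length : Int) = pvCnt l := by
  induction l with
  | nil => intro s; simp [pvPlaces, pvCnt]
  | cons c r ih =>
    intro s
    by_cases hc : c = 'S' <;> simp [pvPlaces, pvCnt, hc, ih]
    omega

theorem pv_pairdiffs_small (q : List Int) (h : q.length ≤ 1) : pvPairDiffs q = [] := by
  match q with
  | [] => rfl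
  | [a] => rfl
  | a :: b :: r => simp at h

theorem pv_map_range (n : Nat) : ∀ (p : List Int), p.length = 2*n + 2 →
    (List.range n).map (fun k => p.getD (2*k+2) 0 - p.getD (2*k+1) 0) = pvPairDiffs p.tail := by
  induction n with
  | zero =>
    intro p hp
    rcases p with _ | ⟨a, q⟩
    · exact absurd hp (by simp only [List.length_nil]; omega)
    · have hq : q.length ≤ 1 := by simp only [List.length_cons] at hp; omega
      simp [pv_pairdiffs_small q hq]
  | succ n ih =>
    intro p hp
    rcases p with _ | ⟨a, _ | ⟨b, _ | ⟨c, r⟩⟩⟩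
    · exact absurd hp (by simp only [List.length_nil]; omega)
    · exact absurd hp (by simp only [List.length_cons, List.length_nil]; omega)
    · exact absurd hp (by simp only [List.length_cons, List.length_nil]; omega)
    · rw [List.range_succ_eq_map]
      simp only [List.map_cons, List.map_map]
      have hlen : (c :: r).length = 2*n + 2 := by
        simp only [List.length_cons] at hp ⊢; omega
      have hfun : ((fun k => List.getD (a :: b :: c :: r) (2*k+2) 0 - List.getD (a :: b :: c :: r) (2*k+1) 0) ∘ Nat.succ)
          = (fun k => List.getD (c :: r) (2*k+2) 0 - List.getD (c :: r) (2*k+1) 0) := by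
        funext k; rfl
      rw [hfun, ih (c :: r) hlen]
      rfl

-- A's indexed loop over range(m//2 - 1) equals the structural fold over the pair differences
theorem pv_afold (p : List Int) (n : Nat) (hp : p.length = 2*n + 2) :
    (PySem.List.pyRange 0 (n : Int) 1).foldl
      (fun ans i =>
        PySem.Int.mod (ans * (PySem.List.pyGetD p (2*i+2) 0 - PySem.List.pyGetD p (2*i+1) 0)) (10^9 + 7)) 1
      = (pvPairDiffs p.tail).foldl pvStep 1 := by
  rw [PySem.List.pyRange_one]
  have h0 : (((n:Int)) - 0).toNat = n := by simp
  rw [h0]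
  simp only [List.foldl_map]
  have hfun : (fun (ans : Int) (k : Nat) =>
        PySem.Int.mod (ans * (PySem.List.pyGetD p (2*((0:Int) + (k:Int))+2) 0 - PySem.List.pyGetD p (2*((0:Int)+(k:Int))+1) 0)) (10^9 + 7))
      = (fun (ans : Int) (k : Nat) => pvStep ans (p.getD (2*k+2) 0 - p.getD (2*k+1) 0)) := by
    funext ans k
    rw [show (2*((0:Int)+(k:Int))+2) = ((2*k+2 : Nat) : Int) from by push_cast; ring]
    rw [show (2*((0:Int)+(k:Int))+1) = ((2*k+1 : Nat) : Int) from by push_cast; ring]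
    rw [PySem.List.pyGetD_natCast, PySem.List.pyGetD_natCast]
    rfl
  rw [hfun, ← List.foldl_map, pv_map_range n p hp]

-- the gaps state machine, characterised by the seat-index list
theorem pv_gaps_EO (l : List Char) :
    (∀ (s b : Int), pvGapsE l b = (match pvPlaces s l with
        | [] => ([] : List Int)
        | q :: t => (q - s + b + 1) :: pvPairDiffs t)) ∧
    (∀ s : Int, pvGapsO l = pvPairDiffs (pvPlaces s l)) := by
  induction l with
  | nil => exact ⟨fun s b => rfl, fun s => rfl⟩
  | cons c r ih =>
    constructor
    · intro s b
      by_cases hc : c = 'S'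
      · rw [show pvGapsE (c :: r) b = (b + 1) :: pvGapsO r from by simp [pvGapsE, hc]]
        rw [show pvPlaces s (c :: r) = s :: pvPlaces (s+1) r from by simp [pvPlaces, hc]]
        rw [ih.2 (s+1)]
        simp only [List.cons.injEq]
        exact ⟨by ring, trivial⟩
      · rw [show pvGapsE (c :: r) b = pvGapsE r (b+1) from by simp [pvGapsE, hc]]
        rw [show pvPlaces s (c :: r) = pvPlaces (s+1) r from by simp [pvPlaces, hc]]
        rw [ih.1 (s+1) (b+1)]
        cases pvPlaces (s+1) r with
        | nil => rfl
        | cons q t => simp only [List.cons.injEq]; exact ⟨by ring, trivial⟩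
    · intro s
      by_cases hc : c = 'S'
      · rw [show pvGapsO (c :: r) = pvGapsE r 0 from by simp [pvGapsO, hc]]
        rw [show pvPlaces s (c :: r) = s :: pvPlaces (s+1) r from by simp [pvPlaces, hc]]
        rw [ih.1 (s+1) 0]
        cases pvPlaces (s+1) r with
        | nil => rfl
        | cons q t =>
          rw [show pvPairDiffs (s :: q :: t) = (q - s) :: pvPairDiffs t from rfl]
          simp only [List.cons.injEq]
          exact ⟨by ring, trivial⟩
      · rw [show pvGapsO (c :: r) = pvGapsO r from by simp [pvGapsO, hc]]
        rw [show pvPlaces s (c :: r) = pvPlaces (s+1) r from by simp [pvPlaces, hc]]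
        exact ih.2 (s+1)

theorem pv_gaps_0 (l : List Char) : ∀ s : Int, pvGaps0 l = pvPairDiffs (pvPlaces s l).tail := by
  induction l with
  | nil => intro s; rfl
  | cons c r ih =>
    intro s
    by_cases hc : c = 'S'
    · rw [show pvGaps0 (c :: r) = pvGapsO r from by simp [pvGaps0, hc]]
      rw [show pvPlaces s (c :: r) = s :: pvPlaces (s+1) r from by simp [pvPlaces, hc]]
      exact (pv_gaps_EO r).2 (s+1)
    · rw [show pvGaps0 (c :: r) = pvGaps0 r from by simp [pvGaps0, hc]]
      rw [show pvPlaces s (c :: r) = pvPlaces (s+1) r from by simp [pvPlaces, hc]]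
      exact ih (s+1)

-- B's scan, characterised: final seats = seats + #S, final ways = fold of the pending gap list
theorem pv_scan_EO (l : List Char) :
    (∀ (s b w : Int), 2 ≤ s → s % 2 = 0 →
      ∃ b', l.foldl pvScanStep (s, b, w) = (s + pvCnt l, b', (pvGapsE l b).foldl pvStep w)) ∧
    (∀ (s b w : Int), 1 ≤ s → s % 2 = 1 →
      ∃ b', l.foldl pvScanStep (s, b, w) = (s + pvCnt l, b', (pvGapsO l).foldl pvStep w)) := by
  induction l with
  | nil =>
    constructor
    · intro s b w _ _; exact ⟨b, by simp [pvCnt, pvGapsE]⟩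
    · intro s b w _ _; exact ⟨b, by simp [pvCnt, pvGapsO]⟩
  | cons c r ih =>
    constructor
    · intro s b w hs he
      by_cases hc : c = 'S'
      · have hcond : PySem.Int.mod (s+1) 2 = 1 ∧ s+1 ≥ 3 := ⟨by rw [pv_mod_two]; omega, by omega⟩
        have hstep : pvScanStep (s, b, w) c = (s+1, 0, pvStep w (b+1)) := by
          simp only [pvScanStep, hc, if_true]
          rw [if_pos hcond]
          rfl
        obtain ⟨b', hb⟩ := ih.2 (s+1) 0 (pvStep w (b+1)) (by omega) (by omega)
        refine ⟨b', ?_⟩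
        rw [List.foldl_cons, hstep, hb]
        rw [show pvGapsE (c :: r) b = (b+1) :: pvGapsO r from by simp [pvGapsE, hc]]
        rw [show pvCnt (c :: r) = 1 + pvCnt r from by simp [pvCnt, hc]]
        rw [show s + (1 + pvCnt r) = s + 1 + pvCnt r from by ring, List.foldl_cons]
      · have hcond : s ≠ 0 ∧ PySem.Int.mod s 2 = 0 := ⟨by omega, by rw [pv_mod_two]; omega⟩
        have hstep : pvScanStep (s, b, w) c = (s, b+1, w) := by
          simp only [pvScanStep, if_neg hc]
          rw [if_pos hcond]
        obtain ⟨b', hb⟩ := ih.1 s (b+1) w hs he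
        refine ⟨b', ?_⟩
        rw [List.foldl_cons, hstep, hb]
        rw [show pvGapsE (c :: r) b = pvGapsE r (b+1) from by simp [pvGapsE, hc]]
        rw [show pvCnt (c :: r) = pvCnt r from by simp [pvCnt, hc]]
    · intro s b w hs ho
      by_cases hc : c = 'S'
      · have hcond : ¬(PySem.Int.mod (s+1) 2 = 1 ∧ s+1 ≥ 3) := by
          intro h; rw [pv_mod_two] at h; omega
        have hstep : pvScanStep (s, b, w) c = (s+1, 0, w) := by
          simp only [pvScanStep, hc, if_true]
          rw [if_neg hcond]
        obtain ⟨b', hb⟩ := ih.1 (s+1) 0 w (by omega) (by omega)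
        refine ⟨b', ?_⟩
        rw [List.foldl_cons, hstep, hb]
        rw [show pvGapsO (c :: r) = pvGapsE r 0 from by simp [pvGapsO, hc]]
        rw [show pvCnt (c :: r) = 1 + pvCnt r from by simp [pvCnt, hc]]
        rw [show s + (1 + pvCnt r) = s + 1 + pvCnt r from by ring]
      · have hcond : ¬(s ≠ 0 ∧ PySem.Int.mod s 2 = 0) := by
          intro h; rw [pv_mod_two] at h; omega
        have hstep : pvScanStep (s, b, w) c = (s, b, w) := by
          simp only [pvScanStep, if_neg hc]
          rw [if_neg hcond]
        obtain ⟨b', hb⟩ := ih.2 s b w hs ho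
        refine ⟨b', ?_⟩
        rw [List.foldl_cons, hstep, hb]
        rw [show pvGapsO (c :: r) = pvGapsO r from by simp [pvGapsO, hc]]
        rw [show pvCnt (c :: r) = pvCnt r from by simp [pvCnt, hc]]

theorem pv_scan_0 (l : List Char) : ∀ b w : Int,
    ∃ b', l.foldl pvScanStep (0, b, w) = (pvCnt l, b', (pvGaps0 l).foldl pvStep w) := by
  induction l with
  | nil => intro b w; exact ⟨b, by simp [pvCnt, pvGaps0]⟩
  | cons c r ih =>
    intro b w
    by_cases hc : c = 'S'
    · have hcond : ¬(PySem.Int.mod ((0:Int)+1) 2 = 1 ∧ (0:Int)+1 ≥ 3) := by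
        intro h; omega
      have hstep : pvScanStep (0, b, w) c = (1, 0, w) := by
        simp only [pvScanStep, hc, if_true]
        rw [if_neg hcond]
        norm_num
      obtain ⟨b', hb⟩ := (pv_scan_EO r).2 1 0 w (by omega) (by omega)
      refine ⟨b', ?_⟩
      rw [List.foldl_cons, hstep, hb]
      rw [show pvGaps0 (c :: r) = pvGapsO r from by simp [pvGaps0, hc]]
      rw [show pvCnt (c :: r) = 1 + pvCnt r from by simp [pvCnt, hc]]
    · have hstep : pvScanStep (0, b, w) c = (0, b, w) := by
        simp only [pvScanStep, if_neg hc]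
        rw [if_neg (by intro h; exact h.1 rfl)]
      obtain ⟨b', hb⟩ := ih b w
      refine ⟨b', ?_⟩
      rw [List.foldl_cons, hstep, hb]
      rw [show pvGaps0 (c :: r) = pvGaps0 r from by simp [pvGaps0, hc]]
      rw [show pvCnt (c :: r) = pvCnt r from by simp [pvCnt, hc]]

-- ===== VERDICT (by name: the statement is the Claim_ definition above) =====
theorem numberOfWays_spec : Claim_equal_numberOfWays := by
  intro C _
  unfold Spec_numberOfWays numberOfWays numberOfWays_alt
  obtain ⟨b', hb⟩ := pv_scan_0 C.toList 0 1
  simp only [pv_filter_pred, pv_places_enum, hb, pv_mod_two, pv_cnt_places]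
  by_cases hg : pvCnt C.toList % 2 = 1 ∨ pvCnt C.toList < 2
  · rw [if_pos hg, if_pos hg]
  · rw [if_neg hg, if_neg hg]
    have hcnt := pv_cnt_places C.toList 0
    have hL : (pvPlaces 0 C.toList).length = 2 * ((pvPlaces 0 C.toList).length / 2 - 1) + 2 := by
      omega
    rw [PySem.Int.floordiv_eq_ediv_of_pos (by norm_num)]
    rw [show pvCnt C.toList / 2 - 1 = (((pvPlaces 0 C.toList).length / 2 - 1 : Nat) : Int) from by
      omega]
    rw [pv_afold (pvPlaces 0 C.toList) ((pvPlaces 0 C.toList).length / 2 - 1) hL]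
    rw [← pv_gaps_0 C.toList 0]
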